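-- pv_equiv track=rewrite | github.com/peytontolbert/TOLBERT | scripts/eval_retrieval.py | compute_relevance_mask
-- ===== SOURCE A (Python) =====
-- from typing import Any, Dict, List, Sequence, Tuple
--
-- def compute_relevance_mask(
--     query_paths: Sequence[Sequence[int]],
--     index_paths: Sequence[Sequence[int]],
--     min_level: int,
-- ) -> List[List[bool]]:
--     """
--     Build a boolean matrix R where R[i][j] is True if query i and index j
--     share at least one node at depth >= min_level in their node_path.
--
--     Paths are lists of node ids [root, c1, c2, ...].
--     """
--     rel: List[List[bool]] = []
--     for q_path in query_paths:
--         row: List[bool] = []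
--         for idx_path in index_paths:
--             # shared depth = deepest k where q_path[k] == idx_path[k]
--             shared = False
--             max_shared_level = min(len(q_path), len(idx_path)) - 1
--             for lvl in range(min_level, max_shared_level + 1):
--                 if q_path[lvl] == idx_path[lvl]:
--                     shared = True
--                     break
--             row.append(shared)
--         rel.append(row)
--     return rel
-- ===== SOURCE B (Python) =====
-- def compute_relevance_mask(query_paths, index_paths, min_level):
--     # One (level, node) tag set per path, computed once; each cell is a
--     # set-disjointness test instead of a scan over levels.
--     def tags(p):
--         return {(lvl, p[lvl]) for lvl in range(min_level, len(p))}
--     q_tags = [tags(q) for q in query_paths]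
--     i_tags = [tags(i) for i in index_paths]
--     return [[not qt.isdisjoint(it) for it in i_tags] for qt in q_tags]
-- ===== Notes on version B (the rewrite author's own statement) =====
-- stated objective: faster
-- what changed: A scans the level range per (query,index) cell with an early break; B precomputes one (level,node) tag set per path once and decides each cell by a hash-set disjointness test; Pre_ excludes negative min_level inputs with a path shorter than -min_level alongside an empty other list, where A happens to return (its inner loop never runs) while B's eager tag building raises IndexError.
-- outside the precondition, e.g. on compute_relevance_mask([[1, 2]], [], -5): A returns [[]], B raises IndexError
import Mathlib
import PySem

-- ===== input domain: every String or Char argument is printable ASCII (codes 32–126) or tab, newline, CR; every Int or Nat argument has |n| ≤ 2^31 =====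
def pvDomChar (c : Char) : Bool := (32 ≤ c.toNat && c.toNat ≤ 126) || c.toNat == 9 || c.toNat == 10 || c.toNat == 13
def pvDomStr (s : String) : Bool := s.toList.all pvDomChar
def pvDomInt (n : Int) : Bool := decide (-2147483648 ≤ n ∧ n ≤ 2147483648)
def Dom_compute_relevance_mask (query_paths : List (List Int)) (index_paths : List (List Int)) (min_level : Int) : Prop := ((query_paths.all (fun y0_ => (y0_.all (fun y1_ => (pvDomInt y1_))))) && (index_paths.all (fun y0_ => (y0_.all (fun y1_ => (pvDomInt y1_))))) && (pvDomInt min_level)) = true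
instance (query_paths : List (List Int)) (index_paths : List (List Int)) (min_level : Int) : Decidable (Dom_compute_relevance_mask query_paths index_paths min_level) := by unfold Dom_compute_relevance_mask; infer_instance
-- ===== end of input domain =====

-- B replaces A's per-cell scan over levels by one precomputed (level, node) tag set per path
-- and a set-disjointness test per cell (objective: faster by a constant-factor mechanism).

-- ===== PORT A =====
-- inner 'for lvl in …: if q[lvl] == i[lvl]: shared = True; break' loop of A.
-- Python raises IndexError when an index is out of range (the `_, _` branch); those inputs are excluded by Pre_.
def pvAGo (q_path idx_path : List Int) : List Int → Bool
  | [] => false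
  | lvl :: rest =>
    match PySem.List.pyGet? q_path lvl, PySem.List.pyGet? idx_path lvl with
    | some a, some b => if a == b then true else pvAGo q_path idx_path rest
    | _, _ => pvAGo q_path idx_path rest

def compute_relevance_mask (query_paths : List (List Int)) (index_paths : List (List Int)) (min_level : Int) : List (List Bool) :=
  query_paths.foldl (fun rel q_path =>
    rel ++ [index_paths.foldl (fun row idx_path =>
      row ++ [pvAGo q_path idx_path
        (PySem.List.pyRange min_level ((min (q_path.length : Int) (idx_path.length : Int) - 1) + 1) 1)]) []]) []

-- ===== PORT B =====
-- tags p = {(lvl, p[lvl]) for lvl in range(min_level, len(p))}; p[lvl] is in range on every input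
-- admitted by Pre_, so pyGetD's default is unreachable there (Python raises IndexError outside Pre_).
def pvTags (min_level : Int) (p : List Int) : PySem.Set (Int × Int) :=
  (PySem.List.pyRange min_level (p.length : Int) 1).foldl
    (fun s lvl => PySem.Set.add s (lvl, PySem.List.pyGetD p lvl 0))
    PySem.Set.empty

def compute_relevance_mask_alt (query_paths : List (List Int)) (index_paths : List (List Int)) (min_level : Int) : List (List Bool) :=
  let q_tags := query_paths.map (pvTags min_level)
  let i_tags := index_paths.map (pvTags min_level)
  q_tags.map (fun qt => i_tags.map (fun it => !(PySem.Set.isdisjoint qt it)))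

-- ===== PRECONDITION & SPEC =====
-- Pre_ admits every input where B's Python returns: a nonnegative min_level, or every path in
-- both lists long enough for Python's negative index min_level. Outside Pre_ B raises IndexError;
-- A also raises there except when one list is empty or the offending level is never compared
-- (see the cited example), where its inner loop happens never to touch the short path.
def Pre_compute_relevance_mask (query_paths : List (List Int)) (index_paths : List (List Int)) (min_level : Int) : Prop :=
  0 ≤ min_level ∨
    ((∀ q ∈ query_paths, -min_level ≤ (q.length : Int)) ∧ (∀ i ∈ index_paths, -min_level ≤ (i.length : Int)))
instance (query_paths : List (List Int)) (index_paths : List (List Int)) (min_level : Int) : Decidable (Pre_compute_relevance_mask query_paths index_paths min_level) := by unfold Pre_compute_relevance_mask; infer_instance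

def pvWitness_compute_relevance_mask : List (List Int) × List (List Int) × Int := ([[1, 2], [3]], [[1, 4], [5]], 1)

def Spec_compute_relevance_mask (query_paths : List (List Int)) (index_paths : List (List Int)) (min_level : Int) (out : List (List Bool)) : Prop := out = compute_relevance_mask_alt query_paths index_paths min_level
instance (query_paths : List (List Int)) (index_paths : List (List Int)) (min_level : Int) (out : List (List Bool)) : Decidable (Spec_compute_relevance_mask query_paths index_paths min_level out) := by unfold Spec_compute_relevance_mask; infer_instance

-- ===== CLAIM (what is proved, stated in full; the proofs are below) =====
def Claim_equal_compute_relevance_mask : Prop := ∀ (query_paths : List (List Int)) (index_paths : List (List Int)) (min_level : Int), Dom_compute_relevance_mask query_paths index_paths min_level → Pre_compute_relevance_mask query_paths index_paths min_level → Spec_compute_relevance_mask query_paths index_paths min_level (compute_relevance_mask query_paths index_paths min_level)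

-- ===== LEMMAS AND PROOFS =====

-- A's break-loop is an 'any' over the level range.
theorem pvAGo_eq_any (q i : List Int) (ls : List Int) :
    pvAGo q i ls = ls.any (fun lvl =>
      match PySem.List.pyGet? q lvl, PySem.List.pyGet? i lvl with
      | some a, some b => a == b
      | _, _ => false) := by
  induction ls with
  | nil => rfl
  | cons l rest ih =>
    simp only [pvAGo, List.any_cons, ← ih]
    cases PySem.List.pyGet? q l <;> cases PySem.List.pyGet? i l <;> simp [beq_eq_decide]

theorem pyGet?_of_inRange (xs : List Int) (i : Int) (h : PySem.Raise.InRange xs.length i) :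
    PySem.List.pyGet? xs i = some (PySem.List.pyGetD xs i 0) := by
  cases hx : PySem.List.pyGet? xs i with
  | none => exact absurd ((PySem.List.pyGet?_eq_none_iff xs i).mp hx) (by simpa using h)
  | some v =>
    have hdef : PySem.List.pyGetD xs i 0 = (PySem.List.pyGet? xs i).getD 0 := rfl
    rw [hdef, hx]; rfl

-- characterisation of B's tag set
theorem mem_pvTags (ml : Int) (p : List Int) (t : Int × Int) :
    t ∈ pvTags ml p ↔ ∃ lvl : Int, ml ≤ lvl ∧ lvl < (p.length : Int) ∧
      t = (lvl, PySem.List.pyGetD p lvl 0) := by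
  unfold pvTags
  rw [show (PySem.Set.empty : PySem.Set (Int × Int)) = [] from rfl,
    show (fun (s : PySem.Set (Int × Int)) (lvl : Int) => PySem.Set.add s (lvl, PySem.List.pyGetD p lvl 0))
      = (fun s lvl => PySem.Set.add s ((fun l => (l, PySem.List.pyGetD p l 0)) lvl)) from rfl,
    ← List.foldl_map (f := fun l : Int => (l, PySem.List.pyGetD p l 0)) (g := PySem.Set.add),
    ← PySem.Set.ofList_eq_foldl]
  simp only [PySem.Set.mem_ofList, List.mem_map, PySem.List.mem_pyRange_one]
  constructor
  · rintro ⟨lvl, ⟨h1, h2⟩, rfl⟩; exact ⟨lvl, h1, h2, rfl⟩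
  · rintro ⟨lvl, h1, h2, rfl⟩; exact ⟨lvl, ⟨h1, h2⟩, rfl⟩

-- the per-cell equivalence, under the per-pair consequence of Pre_
theorem cell_eq (ml : Int) (q i : List Int)
    (h : 0 ≤ ml ∨ (-ml ≤ (q.length : Int) ∧ -ml ≤ (i.length : Int))) :
    pvAGo q i (PySem.List.pyRange ml ((min (q.length : Int) (i.length : Int) - 1) + 1) 1)
      = !(PySem.Set.isdisjoint (pvTags ml q) (pvTags ml i)) := by
  rw [pvAGo_eq_any]
  by_cases hdis : ∀ x ∈ pvTags ml q, x ∉ pvTags ml i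
  · -- disjoint: no level matches
    rw [(PySem.Set.isdisjoint_iff (pvTags ml q) (pvTags ml i)).mpr hdis]
    simp only [Bool.not_true, List.any_eq_false, PySem.List.mem_pyRange_one]
    intro lvl hlvl
    have hq : PySem.Raise.InRange q.length lvl := by simp [PySem.Raise.InRange]; omega
    have hi' : PySem.Raise.InRange i.length lvl := by simp [PySem.Raise.InRange]; omega
    rw [pyGet?_of_inRange q lvl hq, pyGet?_of_inRange i lvl hi']
    simp only [beq_eq_decide]
    intro hvv
    have hmq : (lvl, PySem.List.pyGetD q lvl 0) ∈ pvTags ml q :=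
      (mem_pvTags ml q _).mpr ⟨lvl, hlvl.1, by omega, rfl⟩
    have hmi : (lvl, PySem.List.pyGetD q lvl 0) ∈ pvTags ml i :=
      (mem_pvTags ml i _).mpr ⟨lvl, hlvl.1, by omega, by rw [of_decide_eq_true hvv]⟩
    exact hdis _ hmq hmi
  · -- not disjoint: some tag is shared, so the any is true
    have hd : PySem.Set.isdisjoint (pvTags ml q) (pvTags ml i) = false := by
      cases hval : PySem.Set.isdisjoint (pvTags ml q) (pvTags ml i) with
      | false => rfl
      | true => exact absurd ((PySem.Set.isdisjoint_iff _ _).mp hval) hdis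
    rw [hd]
    push Not at hdis
    obtain ⟨t, htq, hti⟩ := hdis
    obtain ⟨lvl, h1, h2, heqt⟩ := (mem_pvTags ml q t).mp htq
    subst heqt
    obtain ⟨lvl', h1', h2', heq⟩ := (mem_pvTags ml i _).mp hti
    have hl : lvl' = lvl := by simpa using (congrArg Prod.fst heq).symm
    rw [hl] at heq
    have hv : PySem.List.pyGetD q lvl 0 = PySem.List.pyGetD i lvl 0 := by
      simpa using congrArg Prod.snd heq
    simp only [Bool.not_false, List.any_eq_true, PySem.List.mem_pyRange_one]
    refine ⟨lvl, ⟨h1, by omega⟩, ?_⟩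
    rw [pyGet?_of_inRange q lvl (by simp [PySem.Raise.InRange]; omega),
        pyGet?_of_inRange i lvl (by simp [PySem.Raise.InRange]; omega), hv]
    simp

-- ===== VERDICT (by name: the statement is the Claim_ definition above) =====
theorem compute_relevance_mask_spec : Claim_equal_compute_relevance_mask := by
  intro qp ip ml _ hpre
  unfold Spec_compute_relevance_mask compute_relevance_mask compute_relevance_mask_alt
  rw [PySem.List.foldl_append_singleton_eq_map]
  simp only [List.nil_append, List.map_map]
  apply List.map_congr_left
  intro q hq
  rw [PySem.List.foldl_append_singleton_eq_map]
  simp only [List.nil_append, Function.comp]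
  apply List.map_congr_left
  intro i hi
  apply cell_eq
  rcases hpre with h0 | ⟨hall_q, hall_i⟩
  · exact Or.inl h0
  · exact Or.inr ⟨hall_q q hq, hall_i i hi⟩
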